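-- pv_equiv track=rewrite | github.com/zachspiel/bobs-burgers-api-ui | scrapeCharacters.py | seperate_unnamed_relatives
-- ===== SOURCE A (Python) =====
-- def seperate_unnamed_relatives(relatives):
--     UNNAMED_RELATIVES = ["wife", "husband", "daughter", "mother", "aunt", "uncle", "grandparents", "son",
--                          "father", "sister", "child", "brother", "44 year old brother", "grandmother", "grandfather", "parents"]
--     result = relatives
--     for unnamed_relative in UNNAMED_RELATIVES:
--         result = result.replace(
--             "Unnamed " + unnamed_relative, "Unnamed " + unnamed_relative + ",")
--
--     return result
-- ===== SOURCE B (Python) =====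
-- def seperate_unnamed_relatives(relatives):
--     # Single left-to-right scan: at each position try to match "Unnamed <term>"
--     # (terms tried in list order) and emit the comma immediately, instead of
--     # sixteen whole-string .replace passes.
--     UNNAMED_RELATIVES = ["wife", "husband", "daughter", "mother", "aunt", "uncle", "grandparents", "son",
--                          "father", "sister", "child", "brother", "44 year old brother", "grandmother", "grandfather", "parents"]
--     out = []
--     i = 0
--     n = len(relatives)
--     while i < n:
--         matched = False
--         if relatives.startswith("Unnamed ", i):
--             for t in UNNAMED_RELATIVES:
--                 if relatives.startswith(t, i + 8):
--                     j = i + 8 + len(t)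
--                     out.append(relatives[i:j])
--                     out.append(",")
--                     i = j
--                     matched = True
--                     break
--         if not matched:
--             out.append(relatives[i])
--             i += 1
--     return "".join(out)
-- ===== Notes on version B (the rewrite author's own statement) =====
-- stated objective: alternative
-- what changed: Replaces sixteen sequential whole-string .replace passes (one per relative term) by a single left-to-right scan that matches 'Unnamed <term>' once per position and emits the comma immediately.
import Mathlib
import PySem

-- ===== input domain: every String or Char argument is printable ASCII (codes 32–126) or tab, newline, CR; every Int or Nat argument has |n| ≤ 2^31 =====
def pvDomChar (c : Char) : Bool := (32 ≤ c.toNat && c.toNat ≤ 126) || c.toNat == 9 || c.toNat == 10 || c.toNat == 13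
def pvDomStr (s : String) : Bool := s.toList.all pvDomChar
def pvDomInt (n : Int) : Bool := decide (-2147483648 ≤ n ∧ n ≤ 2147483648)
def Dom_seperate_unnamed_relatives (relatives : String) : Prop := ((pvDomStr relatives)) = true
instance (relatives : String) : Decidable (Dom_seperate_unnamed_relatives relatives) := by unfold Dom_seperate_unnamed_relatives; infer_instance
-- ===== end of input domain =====

-- B replaces A's sixteen sequential whole-string .replace passes by ONE left-to-right scan
-- that matches "Unnamed <term>" at each position and emits the comma immediately (alternative
-- decomposition, same exact return value; no speed claim).

-- ===== PORT A =====
def pvUnnamedRelatives : List String :=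
  ["wife", "husband", "daughter", "mother", "aunt", "uncle", "grandparents", "son",
   "father", "sister", "child", "brother", "44 year old brother", "grandmother", "grandfather", "parents"]

-- literal transliteration of A: result = relatives; for t in …: result = result.replace("Unnamed "+t, "Unnamed "+t+",")
def seperate_unnamed_relatives (relatives : String) : String :=
  pvUnnamedRelatives.foldl
    (fun result unnamed_relative =>
      PySem.Str.replace result ("Unnamed " ++ unnamed_relative) ("Unnamed " ++ unnamed_relative ++ ","))
    relatives

-- ===== PORT B =====
def pvTermsC : List (List Char) := pvUnnamedRelatives.map String.toList

def pvPat (t : List Char) : List Char := "Unnamed ".toList ++ t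

-- the scan loop of Source B: at each position try "Unnamed <term>" (terms in list order);
-- on a match emit it plus "," and jump past it, otherwise emit one character
def pvScan (l : List Char) : List Char :=
  match hf : pvTermsC.find? (fun t => (pvPat t).isPrefixOf l) with
  | some t => pvPat t ++ ',' :: pvScan (l.drop (pvPat t).length)
  | none =>
    match l with
    | [] => []
    | c :: z => c :: pvScan z
termination_by l.length
decreasing_by
  · have h2 : pvPat t <+: l := by
      simpa [List.isPrefixOf_iff_prefix] using List.find?_some hf
    have h3 := h2.length_le
    have h4 : 0 < (pvPat t).length := by simp [pvPat]
    simp only [List.length_drop]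
    omega
  · simp

def seperate_unnamed_relatives_alt (relatives : String) : String :=
  String.ofList (pvScan relatives.toList)

-- ===== PRECONDITION & SPEC =====
def Spec_seperate_unnamed_relatives (relatives : String) (out : String) : Prop := out = seperate_unnamed_relatives_alt relatives
instance (relatives : String) (out : String) : Decidable (Spec_seperate_unnamed_relatives relatives out) := by unfold Spec_seperate_unnamed_relatives; infer_instance

-- ===== CLAIM (what is proved, stated in full; the proofs are below) =====
def Claim_equal_seperate_unnamed_relatives : Prop := ∀ (relatives : String), Dom_seperate_unnamed_relatives relatives → Spec_seperate_unnamed_relatives relatives (seperate_unnamed_relatives relatives)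

-- ===== LEMMAS AND PROOFS =====

-- simple recursive presentation of Python's str.replace (old ≠ []), used only in proofs
def pvRepl (old new : List Char) : List Char → List Char
  | [] => []
  | c :: t =>
    if old.isPrefixOf (c :: t) then new ++ pvRepl old new (t.drop (old.length - 1))
    else c :: pvRepl old new t
termination_by l => l.length
decreasing_by
  · simp only [List.length_drop, List.length_cons]
    omega
  · simp

-- the fold step of port A, at the character level
def pvStep (s t : List Char) : List Char := pvRepl (pvPat t) (pvPat t ++ [',']) s

-- ---- generic prefix lemmas ----
lemma pv_prefix_append_le {a y x : List Char} (h : a <+: y ++ x) (hle : a.length ≤ y.length) :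
    a <+: y := by
  obtain ⟨r, hr⟩ := h
  have h1 : (a ++ r).take a.length = a := List.take_left
  rw [hr, List.take_append_of_le_length hle] at h1
  rw [← h1]
  exact List.take_prefix _ _

lemma pv_prefix_append_gt {a y x : List Char} (h : a <+: y ++ x) (hgt : y.length < a.length) :
    y <+: a ∧ a.drop y.length <+: x := by
  obtain ⟨r, hr⟩ := h
  constructor
  · have h1 : (a ++ r).take y.length = a.take y.length :=
      List.take_append_of_le_length (by omega)
    rw [hr, List.take_left'] at h1
    · rw [h1]; exact List.take_prefix _ _
    · rfl
  · have h2 : (a ++ r).drop y.length = a.drop y.length ++ r :=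
      List.drop_append_of_le_length (by omega)
    rw [hr, List.drop_left] at h2
    exact ⟨r, h2.symm⟩

-- ---- decidable facts about the 16 terms ----
lemma pv_terms_incomp : ∀ a ∈ pvTermsC, ∀ b ∈ pvTermsC,
    a = b ∨ (¬ (pvPat a).isPrefixOf (pvPat b) ∧ ¬ (pvPat b).isPrefixOf (pvPat a)) := by decide

lemma pv_terms_comma_free : ∀ t ∈ pvTermsC, ',' ∉ pvPat t := by decide

lemma pv_terms_nodup : pvTermsC.Nodup := by decide

lemma pvPat_cons (t : List Char) : pvPat t = 'U' :: (['n','n','a','m','e','d',' '] ++ t) := by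
  rw [pvPat, show "Unnamed ".toList = 'U' :: ['n','n','a','m','e','d',' '] from by decide]
  rfl

lemma pv_terms_noU : ∀ t ∈ pvTermsC, 'U' ∉ t := by decide

lemma pvPat_ne_nil (t : List Char) : pvPat t ≠ [] := by
  rw [pvPat_cons]; simp

-- if q ≠ t (both terms), pat q is not a prefix of pat t ++ X
lemma pv_not_prefix_pat {q t : List Char} (hq : q ∈ pvTermsC) (ht : t ∈ pvTermsC)
    (hne : q ≠ t) (X : List Char) : ¬ pvPat q <+: pvPat t ++ X := by
  intro h
  rcases pv_terms_incomp q hq t ht with h' | ⟨h1, h2⟩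
  · exact hne h'
  by_cases hle : (pvPat q).length ≤ (pvPat t).length
  · exact h1 (List.isPrefixOf_iff_prefix.mpr (pv_prefix_append_le h hle))
  · exact h2 (List.isPrefixOf_iff_prefix.mpr (pv_prefix_append_gt h (by omega)).1)

-- ---- pvRepl equals PySem's replace for nonempty old ----
lemma pv_go_eq (old new : List Char) (hold : old ≠ []) :
    ∀ fuel l acc, l.length ≤ fuel →
      PySem.Chars.replace.go old new fuel l acc = acc.reverse ++ pvRepl old new l := by
  intro fuel
  induction fuel with
  | zero =>
    intro l acc hl
    have : l = [] := by
      cases l with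
      | nil => rfl
      | cons c t => simp at hl
    subst this
    simp [PySem.Chars.replace.go, pvRepl]
  | succ n ih =>
    intro l acc hl
    cases l with
    | nil => simp [PySem.Chars.replace.go, pvRepl]
    | cons c t =>
      rw [PySem.Chars.replace.go]
      by_cases hp : old.isPrefixOf (c :: t)
      · have hlen : 1 ≤ old.length := by
          cases old with
          | nil => exact absurd rfl hold
          | cons _ _ => simp
        have hdrop : (c :: t).drop old.length = t.drop (old.length - 1) := by
          obtain ⟨k, hk⟩ : ∃ k, old.length = k + 1 := ⟨old.length - 1, by omega⟩
          rw [hk]; simp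
        rw [if_pos hp, ih _ _ (by simp at hl ⊢; omega)]
        rw [pvRepl, if_pos hp, hdrop]
        simp
      · rw [if_neg hp, ih _ _ (by simp at hl ⊢; omega)]
        rw [pvRepl, if_neg hp]
        simp
    
lemma pv_replace_eq (old new l : List Char) (hold : old ≠ []) :
    PySem.Chars.replace l old new = pvRepl old new l := by
  rw [PySem.Chars.replace]
  rw [if_neg (by simpa using hold)]
  simpa using pv_go_eq old new hold l.length l [] le_rfl

-- ---- unfolding lemmas for pvRepl ----
lemma pvRepl_nil (old new : List Char) : pvRepl old new [] = [] := by rw [pvRepl]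

lemma pvRepl_match {old : List Char} (new l : List Char) (hold : old ≠ [])
    (h : old <+: l) : pvRepl old new l = new ++ pvRepl old new (l.drop old.length) := by
  cases l with
  | nil =>
    exact absurd (List.prefix_nil.mp h) hold
  | cons c t =>
    have hlen : 1 ≤ old.length := by
      cases old with
      | nil => exact absurd rfl hold
      | cons _ _ => simp
    have hdrop : (c :: t).drop old.length = t.drop (old.length - 1) := by
      obtain ⟨k, hk⟩ : ∃ k, old.length = k + 1 := ⟨old.length - 1, by omega⟩
      rw [hk]; simp
    rw [pvRepl, if_pos (List.isPrefixOf_iff_prefix.mpr h), hdrop]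

lemma pvRepl_nomatch {old : List Char} (new : List Char) {c : Char} {z : List Char}
    (h : ¬ old <+: (c :: z)) : pvRepl old new (c :: z) = c :: pvRepl old new z := by
  rw [pvRepl, if_neg (fun hb => h (List.isPrefixOf_iff_prefix.mp hb))]

-- pvRepl passes over a block whose characters all differ from old's head
lemma pv_pass (old new : List Char) (hold : old ≠ []) :
    ∀ m Y, (∀ c ∈ m, old.head? ≠ some c) → pvRepl old new (m ++ Y) = m ++ pvRepl old new Y := by
  intro m
  induction m with
  | nil => simp
  | cons c m' ih =>
    intro Y hm
    have hnp : ¬ old <+: (c :: (m' ++ Y)) := by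
      intro hp
      cases old with
      | nil => exact hold rfl
      | cons o os =>
        obtain ⟨r, hr⟩ := hp
        simp at hr
        exact hm c (List.mem_cons_self) (by simp [hr.1])
    rw [List.cons_append, pvRepl_nomatch new hnp, ih Y (fun c hc => hm c (List.mem_cons_of_mem _ hc))]
    simp

-- a distinct term's replace passes straight over "Unnamed t"
lemma pv_pass_pat {q t : List Char} (hq : q ∈ pvTermsC) (ht : t ∈ pvTermsC) (hne : q ≠ t)
    (n X : List Char) : pvRepl (pvPat q) n (pvPat t ++ X) = pvPat t ++ pvRepl (pvPat q) n X := by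
  have hnp : ¬ pvPat q <+: (pvPat t ++ X) := pv_not_prefix_pat hq ht hne X
  have hU : ∀ c ∈ (['n','n','a','m','e','d',' '] ++ t), (pvPat q).head? ≠ some c := by
    intro c hc
    rw [pvPat_cons q]
    simp only [List.head?_cons, ne_eq, Option.some.injEq]
    intro hcu
    subst hcu
    rcases List.mem_append.mp hc with h | h
    · simp at h
    · exact pv_terms_noU t ht h
  calc pvRepl (pvPat q) n (pvPat t ++ X)
      = pvRepl (pvPat q) n ('U' :: ((['n','n','a','m','e','d',' '] ++ t) ++ X)) := by
        rw [pvPat_cons t]; simp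
    _ = 'U' :: pvRepl (pvPat q) n ((['n','n','a','m','e','d',' '] ++ t) ++ X) := by
        apply pvRepl_nomatch
        intro hp
        apply hnp
        rw [pvPat_cons t]
        simpa using hp
    _ = 'U' :: ((['n','n','a','m','e','d',' '] ++ t) ++ pvRepl (pvPat q) n X) := by
        rw [pv_pass _ _ (pvPat_ne_nil q) _ _ hU]
    _ = pvPat t ++ pvRepl (pvPat q) n X := by rw [pvPat_cons t]; simp

lemma pv_pass_comma {q : List Char} (_hq : q ∈ pvTermsC) (n X : List Char) :
    pvRepl (pvPat q) n (',' :: X) = ',' :: pvRepl (pvPat q) n X := by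
  have := pv_pass (pvPat q) n (pvPat_ne_nil q) [','] X (by
    intro c hc
    simp at hc
    subst hc
    rw [pvPat_cons q]
    simp)
  simpa using this

-- decomposition of a replace result
lemma pv_decomp (old n : List Char) (hold : old ≠ []) :
    ∀ l, pvRepl old n l = l ∨
      ∃ u v, l = u ++ old ++ v ∧ pvRepl old n l = u ++ n ++ pvRepl old n v := by
  intro l
  have H : ∀ fuel l, l.length ≤ fuel → pvRepl old n l = l ∨
      ∃ u v, l = u ++ old ++ v ∧ pvRepl old n l = u ++ n ++ pvRepl old n v := by
    intro fuel
    induction fuel with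
    | zero =>
      intro l hl
      have : l = [] := by cases l with | nil => rfl | cons c t => simp at hl
      subst this; left; rw [pvRepl_nil]
    | succ m ih =>
      intro l hl
      by_cases hp : old <+: l
      · right
        obtain ⟨v, hv⟩ := hp
        refine ⟨[], v, by simp [hv.symm], ?_⟩
        rw [pvRepl_match n l hold (⟨v, hv⟩), ← hv, List.drop_left]
        simp
      · cases l with
        | nil => left; rw [pvRepl_nil]
        | cons c z =>
          rcases ih z (by simp at hl; omega) with h | ⟨u, v, hz, hr⟩
          · left; rw [pvRepl_nomatch n hp, h]
          · right
            refine ⟨c :: u, v, by simp [hz], ?_⟩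
            rw [pvRepl_nomatch n hp, hr]
            simp
  exact H l.length l le_rfl

-- replacing one term never creates or destroys a head match of any term
lemma pv_nomatch_pres {t q : List Char} (ht : t ∈ pvTermsC) (_hq : q ∈ pvTermsC) (l : List Char)
    (h : pvPat t <+: pvRepl (pvPat q) (pvPat q ++ [',']) l) : pvPat t <+: l := by
  rcases pv_decomp (pvPat q) (pvPat q ++ [',']) (pvPat_ne_nil q) l with he | ⟨u, v, hl, hr⟩
  · rwa [he] at h
  · rw [hr] at h
    have h' : pvPat t <+: (u ++ pvPat q) ++ (',' :: pvRepl (pvPat q) (pvPat q ++ [',']) v) := by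
      simpa using h
    by_cases hle : (pvPat t).length ≤ (u ++ pvPat q).length
    · have := pv_prefix_append_le h' hle
      rw [hl]
      calc pvPat t <+: u ++ pvPat q := this
        _ <+: (u ++ pvPat q) ++ v := List.prefix_append _ _
    · exfalso
      obtain ⟨_, hdrop⟩ := pv_prefix_append_gt h' (by omega)
      have hne : (pvPat t).drop (u ++ pvPat q).length ≠ [] := by
        intro hnil
        have := List.drop_eq_nil_iff.mp hnil
        omega
      have hcm : ',' ∈ (pvPat t).drop (u ++ pvPat q).length := by
        cases hd : (pvPat t).drop (u ++ pvPat q).length with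
        | nil => exact absurd hd hne
        | cons a as =>
          obtain ⟨r, hrr⟩ := hdrop
          rw [hd] at hrr
          simp at hrr
          simp [hrr.1]
      exact pv_terms_comma_free t ht (List.drop_subset _ _ hcm)

-- ---- fold lemmas ----
lemma pv_fold_nil : ∀ ts : List (List Char), List.foldl pvStep [] ts = [] := by
  intro ts
  induction ts with
  | nil => rfl
  | cons q ts ih => simp [List.foldl_cons, pvStep, pvRepl_nil, ih]

lemma pv_fold_char (ts : List (List Char)) (hts : ∀ x ∈ ts, x ∈ pvTermsC) :
    ∀ c z, (∀ t ∈ pvTermsC, ¬ pvPat t <+: (c :: z)) →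
      List.foldl pvStep (c :: z) ts = c :: List.foldl pvStep z ts := by
  induction ts with
  | nil => intros; rfl
  | cons q ts ih =>
    intro c z hnm
    have hq : q ∈ pvTermsC := hts q List.mem_cons_self
    have h1 : pvStep (c :: z) q = c :: pvStep z q := by
      unfold pvStep
      exact pvRepl_nomatch _ (hnm q hq)
    have h2 : ∀ t ∈ pvTermsC, ¬ pvPat t <+: (c :: pvStep z q) := by
      intro t ht hp
      rw [← h1] at hp
      exact hnm t ht (pv_nomatch_pres ht hq _ hp)
    rw [List.foldl_cons, h1, ih (fun x hx => hts x (List.mem_cons_of_mem _ hx)) c (pvStep z q) h2,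
      List.foldl_cons]

lemma pv_fold_pass {t : List Char} (ht : t ∈ pvTermsC) (ts : List (List Char))
    (hts : ∀ x ∈ ts, x ∈ pvTermsC) (hnot : t ∉ ts) :
    ∀ X, List.foldl pvStep (pvPat t ++ X) ts = pvPat t ++ List.foldl pvStep X ts := by
  induction ts with
  | nil => intro X; rfl
  | cons q ts ih =>
    intro X
    have hq : q ∈ pvTermsC := hts q List.mem_cons_self
    have hne : q ≠ t := fun h => hnot (h ▸ List.mem_cons_self)
    rw [List.foldl_cons, List.foldl_cons]
    show List.foldl pvStep (pvRepl (pvPat q) (pvPat q ++ [',']) (pvPat t ++ X)) ts = _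
    rw [pv_pass_pat hq ht hne]
    exact ih (fun x hx => hts x (List.mem_cons_of_mem _ hx)) (fun h => hnot (List.mem_cons_of_mem _ h)) _

lemma pv_fold_pass_comma {t : List Char} (ht : t ∈ pvTermsC) (ts : List (List Char))
    (hts : ∀ x ∈ ts, x ∈ pvTermsC) (hnot : t ∉ ts) :
    ∀ X, List.foldl pvStep (pvPat t ++ ',' :: X) ts = pvPat t ++ ',' :: List.foldl pvStep X ts := by
  induction ts with
  | nil => intro X; rfl
  | cons q ts ih =>
    intro X
    have hq : q ∈ pvTermsC := hts q List.mem_cons_self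
    have hne : q ≠ t := fun h => hnot (h ▸ List.mem_cons_self)
    rw [List.foldl_cons, List.foldl_cons]
    show List.foldl pvStep (pvRepl (pvPat q) (pvPat q ++ [',']) (pvPat t ++ ',' :: X)) ts = _
    rw [pv_pass_pat hq ht hne, pv_pass_comma hq]
    exact ih (fun x hx => hts x (List.mem_cons_of_mem _ hx)) (fun h => hnot (List.mem_cons_of_mem _ h)) _

-- ---- pvScan unfolding lemmas ----
lemma pvScan_some {l : List Char} {t : List Char}
    (h : pvTermsC.find? (fun t => (pvPat t).isPrefixOf l) = some t) :
    pvScan l = pvPat t ++ ',' :: pvScan (l.drop (pvPat t).length) := by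
  rw [pvScan]
  split
  · rename_i t' h'
    rw [h] at h'
    cases h'
    rfl
  · rename_i h'
    rw [h] at h'
    cases h'

lemma pvScan_nil : pvScan [] = [] := by
  rw [pvScan]
  split
  · rename_i t h
    have h1 : pvPat t <+: ([] : List Char) := by
      simpa [List.isPrefixOf_iff_prefix] using List.find?_some h
    exact absurd (List.prefix_nil.mp h1) (pvPat_ne_nil t)
  · rfl

lemma pvScan_char {c : Char} {z : List Char}
    (h : pvTermsC.find? (fun t => (pvPat t).isPrefixOf (c :: z)) = none) :
    pvScan (c :: z) = c :: pvScan z := by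
  rw [pvScan]
  split
  · rename_i t h'
    rw [h] at h'
    cases h'
  · rfl

-- ---- main character-level theorem ----
lemma pv_main : ∀ l, List.foldl pvStep l pvTermsC = pvScan l := by
  have H : ∀ n l, l.length ≤ n → List.foldl pvStep l pvTermsC = pvScan l := by
    intro n
    induction n with
    | zero =>
      intro l hl
      have : l = [] := by cases l with | nil => rfl | cons c t => simp at hl
      subst this
      rw [pv_fold_nil, pvScan_nil]
    | succ m ih =>
      intro l hl
      cases hf : pvTermsC.find? (fun t => (pvPat t).isPrefixOf l) with
      | some t =>
        have ht : t ∈ pvTermsC := List.mem_of_find?_eq_some hf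
        have hp : pvPat t <+: l := by
          simpa [List.isPrefixOf_iff_prefix] using List.find?_some hf
        obtain ⟨rest, hrest⟩ := hp
        obtain ⟨A₁, A₂, hdec⟩ := List.append_of_mem ht
        have hnodup := pv_terms_nodup
        rw [hdec] at hnodup
        have hperm : (A₁ ++ t :: A₂).Perm (t :: (A₁ ++ A₂)) := by
          exact List.perm_middle
        have hnd2 : (t :: (A₁ ++ A₂)).Nodup := hperm.nodup hnodup
        have htm : t ∉ A₁ ++ A₂ := (List.nodup_cons.mp hnd2).1
        have ht1 : t ∉ A₁ := fun h => htm (List.mem_append.mpr (Or.inl h))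
        have ht2 : t ∉ A₂ := fun h => htm (List.mem_append.mpr (Or.inr h))
        have hsubs1 : ∀ x ∈ A₁, x ∈ pvTermsC := fun x hx => by rw [hdec]; simp [hx]
        have hsubs2 : ∀ x ∈ A₂, x ∈ pvTermsC := fun x hx => by rw [hdec]; simp [hx]
        have hlt : rest.length < l.length := by
          have h4 : 0 < (pvPat t).length := by
            rw [pvPat_cons]; simp
          have := congrArg List.length hrest
          simp at this
          omega
        calc List.foldl pvStep l pvTermsC
            = List.foldl pvStep (List.foldl pvStep l A₁) (t :: A₂) := by
              rw [hdec, List.foldl_append]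
          _ = List.foldl pvStep (pvPat t ++ List.foldl pvStep rest A₁) (t :: A₂) := by
              rw [← hrest, pv_fold_pass ht A₁ hsubs1 ht1]
          _ = List.foldl pvStep (pvPat t ++ ',' :: pvRepl (pvPat t) (pvPat t ++ [','])
                (List.foldl pvStep rest A₁)) A₂ := by
              rw [List.foldl_cons]
              congr 1
              show pvRepl (pvPat t) (pvPat t ++ [',']) (pvPat t ++ List.foldl pvStep rest A₁) = _
              rw [pvRepl_match _ _ (pvPat_ne_nil t) (List.prefix_append _ _), List.drop_left]
              simp
          _ = pvPat t ++ ',' :: List.foldl pvStep (pvRepl (pvPat t) (pvPat t ++ [','])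
                (List.foldl pvStep rest A₁)) A₂ := by
              rw [pv_fold_pass_comma ht A₂ hsubs2 ht2]
          _ = pvPat t ++ ',' :: List.foldl pvStep rest pvTermsC := by
              rw [hdec, List.foldl_append, List.foldl_cons]
              rfl
          _ = pvPat t ++ ',' :: pvScan rest := by
              rw [ih rest (by omega)]
          _ = pvScan l := by
              rw [pvScan_some hf, ← hrest, List.drop_left]
      | none =>
        have hnm : ∀ t ∈ pvTermsC, ¬ pvPat t <+: l := by
          intro t ht hp
          have hcon := List.find?_eq_none.mp hf t ht
          simp only [List.isPrefixOf_iff_prefix] at hcon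
          exact hcon hp
        cases l with
        | nil => rw [pv_fold_nil, pvScan_nil]
        | cons c z =>
          rw [pv_fold_char pvTermsC (fun x hx => hx) c z hnm,
            ih z (by simp at hl; omega), pvScan_char hf]
  exact fun l => H l.length l le_rfl

-- ---- lifting to strings ----
lemma pv_lift_fold : ∀ (ts : List String) (s : String),
    (List.foldl (fun result t => PySem.Str.replace result ("Unnamed " ++ t) ("Unnamed " ++ t ++ ",")) s ts).toList
      = List.foldl pvStep s.toList (ts.map String.toList) := by
  intro ts
  induction ts with
  | nil => intro s; rfl
  | cons t ts ih =>
    intro s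
    rw [List.foldl_cons, ih, List.map_cons, List.foldl_cons]
    congr 1
    rw [PySem.Str.toList_replace]
    have hold : ("Unnamed " ++ t).toList = pvPat t.toList := by
      rw [String.toList_append, pvPat]
    have hnew : ("Unnamed " ++ t ++ ",").toList = pvPat t.toList ++ [','] := by
      rw [String.toList_append, hold]
      rfl
    rw [hold, hnew, pv_replace_eq _ _ _ (pvPat_ne_nil t.toList)]
    rfl

-- ===== VERDICT (by name: the statement is the Claim_ definition above) =====
theorem seperate_unnamed_relatives_spec : Claim_equal_seperate_unnamed_relatives := by
  intro relatives _
  unfold Spec_seperate_unnamed_relatives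
  apply String.toList_injective
  rw [seperate_unnamed_relatives, pv_lift_fold, seperate_unnamed_relatives_alt,
    String.toList_ofList]
  exact pv_main relatives.toList
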